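-- pv_equiv track=rewrite | github.com/soulctcher/TetriNode | tetris_node.py | _calc_level
-- ===== SOURCE A (Python) =====
-- def _calc_level(start_level, lines_cleared_total, progression="fixed"):
--     start = max(1, min(15, int(start_level)))
--     if progression == "variable":
--         remaining = int(lines_cleared_total)
--         level = start
--         while level < 15:
--             goal = 5 * level
--             if remaining < goal:
--                 break
--             remaining -= goal
--             level += 1
--         return max(1, min(15, level))
--     return max(1, min(15, start + int(lines_cleared_total // 10)))
-- ===== SOURCE B (Python) =====
-- def _calc_level(start_level, lines_cleared_total, progression="fixed"):
--     start = max(1, min(15, int(start_level)))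
--     if progression == "variable":
--         # closed-form: level L is reachable iff 5*(L*(L-1) - start*(start-1))/2 <= total,
--         # i.e. L*(L-1) <= start*(start-1) + (2*total)//5
--         m = start * (start - 1) + (2 * int(lines_cleared_total)) // 5
--         level = max([L for L in range(start, 16) if L * (L - 1) <= m], default=start)
--         return max(1, min(15, level))
--     return max(1, min(15, start + int(lines_cleared_total // 10)))
-- ===== Notes on version B (the rewrite author's own statement) =====
-- stated objective: alternative
-- what changed: The variable-progression subtract-and-count while loop (mutating remaining/level) is replaced by a closed-form reachability test: level L in [start,15] is reachable iff L*(L-1) <= start*(start-1) + (2*total)//5, and B takes the max qualifying L via a comprehension; the fixed branch and clamps are unchanged.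
import Mathlib
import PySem

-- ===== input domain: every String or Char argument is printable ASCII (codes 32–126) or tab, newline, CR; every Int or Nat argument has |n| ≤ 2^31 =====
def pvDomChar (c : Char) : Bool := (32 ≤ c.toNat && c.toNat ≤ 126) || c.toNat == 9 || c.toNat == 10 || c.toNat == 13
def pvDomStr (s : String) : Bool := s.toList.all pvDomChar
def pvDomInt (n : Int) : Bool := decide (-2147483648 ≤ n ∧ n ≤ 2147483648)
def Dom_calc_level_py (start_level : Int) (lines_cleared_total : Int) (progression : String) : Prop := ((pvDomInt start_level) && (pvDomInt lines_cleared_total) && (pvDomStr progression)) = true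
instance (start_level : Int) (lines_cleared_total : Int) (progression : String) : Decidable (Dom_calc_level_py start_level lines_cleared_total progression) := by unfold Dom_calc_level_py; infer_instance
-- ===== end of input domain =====

-- B replaces A's subtract-and-count while loop by a closed-form reachability test
-- (level L is reachable iff L*(L-1) ≤ start*(start-1) + (2*total)//5); objective: alternative.

-- ===== PORT A =====
-- the while loop: while level < 15: goal = 5*level; if remaining < goal: break; remaining -= goal; level += 1
def calcLoopA (level : Int) (remaining : Int) : Int :=
  if _h : level < 15 then
    let goal := 5 * level
    if remaining < goal then level
    else calcLoopA (level + 1) (remaining - goal)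
  else level
termination_by (15 - level).toNat
decreasing_by omega

def calc_level_py (start_level : Int) (lines_cleared_total : Int) (progression : String) : Int :=
  let start := max 1 (min 15 start_level)
  if progression = "variable" then
    max 1 (min 15 (calcLoopA start lines_cleared_total))
  else
    max 1 (min 15 (start + PySem.Int.floordiv lines_cleared_total 10))

-- ===== PORT B =====
def calc_level_py_alt (start_level : Int) (lines_cleared_total : Int) (progression : String) : Int :=
  let start := max 1 (min 15 start_level)
  if progression = "variable" then
    let m := start * (start - 1) + PySem.Int.floordiv (2 * lines_cleared_total) 5
    let level := PySem.List.maxD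
      ((PySem.List.pyRange start 16 1).filter (fun L => decide (L * (L - 1) ≤ m)))
      (fun x => x) start
    max 1 (min 15 level)
  else
    max 1 (min 15 (start + PySem.Int.floordiv lines_cleared_total 10))

-- ===== PRECONDITION & SPEC =====
def Spec_calc_level_py (start_level : Int) (lines_cleared_total : Int) (progression : String) (out : Int) : Prop := out = calc_level_py_alt start_level lines_cleared_total progression
instance (start_level : Int) (lines_cleared_total : Int) (progression : String) (out : Int) : Decidable (Spec_calc_level_py start_level lines_cleared_total progression out) := by unfold Spec_calc_level_py; infer_instance

-- ===== CLAIM (what is proved, stated in full; the proofs are below) =====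
def Claim_equal_calc_level_py : Prop := ∀ (start_level : Int) (lines_cleared_total : Int) (progression : String), Dom_calc_level_py start_level lines_cleared_total progression → Spec_calc_level_py start_level lines_cleared_total progression (calc_level_py start_level lines_cleared_total progression)

-- ===== LEMMAS AND PROOFS =====

-- running max over the qualifying levels, seeded with lo (proof-side normal form of B's maxD)
def pvF (lo m : Int) : Int :=
  ((PySem.List.pyRange lo 16 1).filter (fun L => decide (L * (L - 1) ≤ m))).foldl max lo

-- B's maxD-with-default equals the seeded running max
lemma maxD_eq_pvF (lo m : Int) :
    PySem.List.maxD ((PySem.List.pyRange lo 16 1).filter (fun L => decide (L * (L - 1) ≤ m)))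
      (fun x => x) lo = pvF lo m := by
  unfold pvF
  cases hfe : (PySem.List.pyRange lo 16 1).filter (fun L => decide (L * (L - 1) ≤ m)) with
  | nil => simp [PySem.List.maxD, PySem.List.max?]
  | cons a t =>
    have ha : a ∈ PySem.List.pyRange lo 16 1 := by
      have : a ∈ (PySem.List.pyRange lo 16 1).filter (fun L => decide (L * (L - 1) ≤ m)) := by
        rw [hfe]; exact List.mem_cons_self
      exact List.mem_of_mem_filter this
    have hlo : lo ≤ a := ((PySem.List.mem_pyRange_one).1 ha).1
    simp [PySem.List.maxD, PySem.List.max?_id_cons, List.foldl_cons, max_eq_right hlo]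

-- stepping the lower bound past a qualifying level does not change the running max
lemma pvF_step (lo m : Int) (hlo : lo < 15) (hq : (lo + 1) * lo ≤ m) :
    pvF lo m = pvF (lo + 1) m := by
  unfold pvF
  have hR : (PySem.List.pyRange (lo + 1) 16 1).filter (fun L => decide (L * (L - 1) ≤ m))
      = (lo + 1) :: (PySem.List.pyRange (lo + 1 + 1) 16 1).filter
          (fun L => decide (L * (L - 1) ≤ m)) := by
    rw [PySem.List.pyRange_one_cons (by omega : lo + 1 < 16), List.filter_cons]
    have ht : (decide ((lo + 1) * ((lo + 1) - 1) ≤ m)) = true := by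
      simp only [decide_eq_true_eq]
      have e : (lo + 1) * ((lo + 1) - 1) = (lo + 1) * lo := by ring
      rw [e]; exact hq
    rw [ht]
    simp
  rw [PySem.List.pyRange_one_cons (by omega : lo < 16), List.filter_cons, hR]
  have hmax : max lo (lo + 1) = lo + 1 := max_eq_right (by omega)
  by_cases hp : lo * (lo - 1) ≤ m
  · rw [if_pos (by simpa using hp)]
    simp only [List.foldl_cons, max_self, hmax]
  · rw [if_neg (by simpa using hp)]
    simp only [List.foldl_cons, max_self, hmax]

-- past the last qualifying level, no level above lo qualifies and the running max is lo
lemma pvF_stop (lo m : Int) (h1 : 1 ≤ lo) (hm : m < (lo + 1) * lo) :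
    pvF lo m = lo := by
  unfold pvF
  have hnil : ∀ L ∈ PySem.List.pyRange (lo + 1) 16 1, ¬ (L * (L - 1) ≤ m) := by
    intro L hL
    have hb := (PySem.List.mem_pyRange_one).1 hL
    have : (lo + 1) * lo ≤ L * (L - 1) := by nlinarith [hb.1, hb.2]
    omega
  by_cases hlt : lo < 16
  · rw [PySem.List.pyRange_one_cons hlt]
    have hrest : (PySem.List.pyRange (lo + 1) 16 1).filter
        (fun L => decide (L * (L - 1) ≤ m)) = [] := by
      apply List.filter_eq_nil_iff.2
      intro L hL
      simpa using hnil L hL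
    by_cases hp : lo * (lo - 1) ≤ m
    · simp [hp, hrest]
    · simp [hp, hrest]
  · rw [PySem.List.pyRange_one_eq_nil (by omega)]
    simp

-- at the cap, the range is the singleton [15] and the running max is 15
lemma pvF_15 (m : Int) : pvF 15 m = 15 := by
  unfold pvF
  rw [PySem.List.pyRange_one_cons (by omega : (15:Int) < 16),
      PySem.List.pyRange_one_eq_nil (by omega : (16:Int) ≤ 15 + 1)]
  by_cases hp : (210 : Int) ≤ m
  · simp [hp]
  · simp [hp]

-- A's while loop computes the closed-form running max
lemma loop_eq_pvF : ∀ (n : Nat) (level r : Int), (15 - level).toNat ≤ n → 1 ≤ level → level ≤ 15 →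
    calcLoopA level r = pvF level (level * (level - 1) + 2 * r / 5) := by
  intro n
  induction n with
  | zero =>
    intro level r hn h1 h15
    have hle : level = 15 := by omega
    subst hle
    rw [calcLoopA]
    simp only [show ¬ (15 : Int) < 15 by omega, dif_neg, not_false_iff]
    exact (pvF_15 _).symm
  | succ n ih =>
    intro level r hn h1 h15
    by_cases hl : level < 15
    · rw [calcLoopA]
      rw [dif_pos hl]
      by_cases hr : r < 5 * level
      · simp only [if_pos hr]
        rw [eq_comm]
        apply pvF_stop level _ h1
        have hmul : (level + 1) * level = level * (level - 1) + 2 * level := by ring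
        rw [hmul]
        omega
      · simp only [if_neg hr]
        rw [ih (level + 1) (r - 5 * level) (by omega) (by omega) (by omega)]
        have hm : (level + 1) * ((level + 1) - 1) + 2 * (r - 5 * level) / 5
            = level * (level - 1) + 2 * r / 5 := by
          have h2 : (level + 1) * ((level + 1) - 1) = level * (level - 1) + 2 * level := by ring
          have h3 : 2 * (r - 5 * level) = 2 * r - 10 * level := by ring
          rw [h2, h3]
          generalize level * (level - 1) = a
          omega
        rw [hm]
        rw [eq_comm]
        apply pvF_step level _ hl
        have hmul : (level + 1) * level = level * (level - 1) + 2 * level := by ring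
        rw [hmul]
        omega
    · have hle : level = 15 := by omega
      subst hle
      rw [calcLoopA]
      simp only [show ¬ (15 : Int) < 15 by omega, dif_neg, not_false_iff]
      exact (pvF_15 _).symm

-- ===== VERDICT (by name: the statement is the Claim_ definition above) =====
theorem calc_level_py_spec : Claim_equal_calc_level_py := by
  intro start_level lines_cleared_total progression _hDom
  unfold Spec_calc_level_py calc_level_py calc_level_py_alt
  by_cases hp : progression = "variable"
  · simp only [hp, if_pos]
    set start := max 1 (min 15 start_level) with hstart
    have h1 : 1 ≤ start := le_max_left _ _
    have h15 : start ≤ 15 := by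
      rw [hstart]
      rcases le_total (1:Int) (min 15 start_level) with h | h
      · rw [max_eq_right h]; exact min_le_left _ _
      · rw [max_eq_left h]; omega
    rw [maxD_eq_pvF]
    rw [PySem.Int.floordiv_eq_ediv_of_pos (by omega : (0:Int) < 5)]
    rw [loop_eq_pvF (15 - start).toNat start lines_cleared_total le_rfl h1 h15]
  · simp only [hp, if_neg, not_false_iff]
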